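-- pv_equiv track=rewrite | github.com/catcatAI/Unified-AI-Project | archived_fix_scripts/lightweight_fix.py | fix_unmatched_parentheses
-- ===== SOURCE A (Python) =====
-- def fix_unmatched_parentheses(content: str) -> str:
--     """修复不匹配的括号"""
--     lines = content.split('\n')
--     fixed_lines = []
--
--     for line in lines:
--         # 简单的括号平衡检查
--         open_parens = line.count('(') + line.count('[') + line.count('{')
--         close_parens = line.count(')') + line.count(']') + line.count('}')
--
--         if open_parens > close_parens:
--             # 尝试添加缺失的右括号
--             missing = open_parens - close_parens
--             for _ in range(missing):
--                 if '(' in line and ')' not in line[line.rfind('('):]: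
--                     line += ')'
--                 elif '[' in line and ']' not in line[line.rfind('['):]:
--                     line += ']'
--                 elif '{' in line and '}' not in line[line.rfind('{'):]:
--                     line += '}'
--
--         fixed_lines.append(line)
--
--     return '\n'.join(fixed_lines)
-- ===== SOURCE B (Python) =====
-- def fix_unmatched_parentheses(content: str) -> str:
--     """Fix unmatched brackets: one character scan per line tracking depth and
--     one per-bracket-kind open-state flag, then append the needed closers at once."""
--     out = []
--     for line in content.split('\n'):
--         depth = 0
--         paren = square = curly = False
--         for ch in line:
--             if ch == '(':
--                 depth += 1
--                 paren = True
--             elif ch == '[':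
--                 depth += 1
--                 square = True
--             elif ch == '{':
--                 depth += 1
--                 curly = True
--             elif ch == ')':
--                 depth -= 1
--                 paren = False
--             elif ch == ']':
--                 depth -= 1
--                 square = False
--             elif ch == '}':
--                 depth -= 1
--                 curly = False
--         if depth > 0:
--             closers = (')' if paren else '') + (']' if square else '') + ('}' if curly else '')
--             line += closers[:depth]
--         out.append(line)
--     return '\n'.join(out)
-- ===== Notes on version B (the rewrite author's own statement) =====
-- stated objective: alternative
-- what changed: Replaces A's multi-pass per-line logic (six count() scans plus a stateful loop that re-runs rfind/slice scans on the mutated line per missing bracket) with one single left-to-right character scan per line maintaining a depth counter and one open-state flag per bracket kind, then appending the needed closers in one shot.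
import Mathlib
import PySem

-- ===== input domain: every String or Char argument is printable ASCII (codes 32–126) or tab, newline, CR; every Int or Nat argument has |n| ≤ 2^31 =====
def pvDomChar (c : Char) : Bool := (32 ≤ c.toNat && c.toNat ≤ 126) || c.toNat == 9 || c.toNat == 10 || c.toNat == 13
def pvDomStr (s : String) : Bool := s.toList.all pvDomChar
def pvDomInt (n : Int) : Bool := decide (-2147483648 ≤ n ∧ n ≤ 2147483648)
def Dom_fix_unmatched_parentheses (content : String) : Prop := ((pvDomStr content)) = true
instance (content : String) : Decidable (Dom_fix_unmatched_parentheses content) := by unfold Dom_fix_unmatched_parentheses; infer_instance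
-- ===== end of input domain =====

-- B replaces A's count/rfind multi-scan per-line logic by ONE character scan per line
-- (a depth counter and an 'unclosed' flag per bracket kind), appending the closers at once.

-- ===== PORT A =====
-- A's bracket condition `o in line and c not in line[line.rfind(o):]`
def pvCond (o c : Char) (l : List Char) : Bool :=
  PySem.Chars.isIn [o] l &&
    !(PySem.Chars.isIn [c] (PySem.Chars.slice l (some (PySem.Chars.rfind l [o])) none))

-- A's loop body: the if/elif chain appending one closing bracket to the mutated line
def pvStepA (l : List Char) : List Char :=
  if pvCond '(' ')' l then l ++ [')']
  else if pvCond '[' ']' l then l ++ [']']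
  else if pvCond '{' '}' l then l ++ ['}']
  else l

def pvFixLineA (line : List Char) : List Char :=
  let opens : Int := (PySem.Chars.count line ['('] : Int) + (PySem.Chars.count line ['['] : Int)
      + (PySem.Chars.count line ['{'] : Int)
  let closes : Int := (PySem.Chars.count line [')'] : Int) + (PySem.Chars.count line [']'] : Int)
      + (PySem.Chars.count line ['}'] : Int)
  if opens > closes then
    let missing : Int := opens - closes
    (PySem.List.pyRange 0 missing 1).foldl (fun l _ => pvStepA l) line
  else line

def fix_unmatched_parentheses (content : String) : String :=
  String.ofList (PySem.Chars.join ['\n']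
    ((PySem.Chars.splitOn content.toList ['\n']).map pvFixLineA))

-- ===== PORT B =====
-- B's per-character scan state: (depth, paren, square, curly)
def pvScanStep : (Int × Bool × Bool × Bool) → Char → (Int × Bool × Bool × Bool)
  | (d, p, q, r), ch =>
    if ch = '(' then (d + 1, true, q, r)
    else if ch = '[' then (d + 1, p, true, r)
    else if ch = '{' then (d + 1, p, q, true)
    else if ch = ')' then (d - 1, false, q, r)
    else if ch = ']' then (d - 1, p, false, r)
    else if ch = '}' then (d - 1, p, q, false)
    else (d, p, q, r)

def pvFixLineB (line : List Char) : List Char :=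
  let s := line.foldl pvScanStep (0, false, false, false)
  if s.1 > 0 then
    line ++ List.take s.1.toNat
      ((if s.2.1 then [')'] else []) ++ (if s.2.2.1 then [']'] else []) ++
        (if s.2.2.2 then ['}'] else []))
  else line

def fix_unmatched_parentheses_alt (content : String) : String :=
  String.ofList (PySem.Chars.join ['\n']
    ((PySem.Chars.splitOn content.toList ['\n']).map pvFixLineB))

-- ===== PRECONDITION & SPEC =====
def Spec_fix_unmatched_parentheses (content : String) (out : String) : Prop := out = fix_unmatched_parentheses_alt content
instance (content : String) (out : String) : Decidable (Spec_fix_unmatched_parentheses content out) := by unfold Spec_fix_unmatched_parentheses; infer_instance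

-- ===== CLAIM (what is proved, stated in full; the proofs are below) =====
def Claim_equal_fix_unmatched_parentheses : Prop := ∀ (content : String), Dom_fix_unmatched_parentheses content → Spec_fix_unmatched_parentheses content (fix_unmatched_parentheses content)

-- ===== LEMMAS AND PROOFS =====

-- the candidate closers of a line, by A's three conditions (proof-only helper)
def pvCands (l : List Char) : List Char :=
  (if pvCond '(' ')' l then [')'] else []) ++
  (if pvCond '[' ']' l then [']'] else []) ++
  (if pvCond '{' '}' l then ['}'] else [])

-- `sub in s` for a single character is membership
theorem pv_isIn_singleton (a : Char) (s : List Char) :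
    PySem.Chars.isIn [a] s = decide (a ∈ s) := by
  by_cases h : a ∈ s
  · simp [h]
    rw [PySem.Chars.isIn_iff_infix]
    obtain ⟨u, v, rfl⟩ := List.append_of_mem h
    exact ⟨u, v, by simp⟩
  · simp [h]
    rw [PySem.Chars.isIn_eq_false_iff]
    intro hin
    exact h (hin.subset (by simp))

-- s.rfind(o) computed top-down: equals this simple descent
def pvLastIdx (s : List Char) (o : Char) : Nat → Int
  | 0 => if s[0]? = some o then (0 : Int) else -1
  | j+1 => if s[j+1]? = some o then ((j+1 : Nat) : Int) else pvLastIdx s o j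

theorem pv_isPrefixOf_singleton (o : Char) (t : List Char) :
    [o].isPrefixOf t = (t[0]? == some o) := by
  cases t with
  | nil => simp [List.isPrefixOf]
  | cons b bs => simp [List.isPrefixOf, eq_comm]

theorem pv_go_eq (s : List Char) (o : Char) : ∀ j, PySem.Chars.rfind.go s [o] j = pvLastIdx s o j := by
  intro j
  induction j with
  | zero =>
      simp [PySem.Chars.rfind.go, pvLastIdx, pv_isPrefixOf_singleton]
  | succ j ih =>
      simp [PySem.Chars.rfind.go, pvLastIdx, pv_isPrefixOf_singleton, ih,
        List.getElem?_drop]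

theorem pv_lastIdx_congr (s t : List Char) (o : Char) :
    ∀ j, (∀ i, i ≤ j → s[i]? = t[i]?) → pvLastIdx s o j = pvLastIdx t o j := by
  intro j
  induction j with
  | zero => intro h; simp [pvLastIdx, h 0 (le_refl 0)]
  | succ j ih =>
      intro h
      simp only [pvLastIdx, h (j+1) (le_refl _)]
      rw [ih (fun i hi => h i (Nat.le_succ_of_le hi))]

theorem pv_lastIdx_succ_of_ge (s : List Char) (o : Char) (j : Nat) (h : s.length ≤ j + 1) :
    pvLastIdx s o (j+1) = pvLastIdx s o j := by
  simp [pvLastIdx, List.getElem?_eq_none h]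

theorem pv_lastIdx_getElem (s : List Char) (o : Char) (j : Nat) (h : s[j]? = some o) :
    pvLastIdx s o j = (j : Int) := by
  cases j <;> simp [pvLastIdx, h]

theorem pv_rfind_append (l : List Char) (o x : Char) (hx : x ≠ o) :
    PySem.Chars.rfind (l ++ [x]) [o] = PySem.Chars.rfind l [o] := by
  unfold PySem.Chars.rfind
  rw [pv_go_eq, pv_go_eq]
  simp only [List.length_append, List.length_cons, List.length_nil]
  rw [pv_lastIdx_succ_of_ge _ _ _ (by simp)]
  cases l with
  | nil => simp [pvLastIdx, hx]
  | cons a as =>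
      have h1 : (a :: as).length = as.length + 1 := rfl
      rw [h1]
      have h2 : ((a :: as) ++ [x])[as.length + 1]? = some x := by
        rw [List.getElem?_append_right (by simp)]
        simp
      have h3 : (a :: as)[as.length + 1]? = none := List.getElem?_eq_none (by simp)
      simp only [pvLastIdx, h2, h3]
      rw [if_neg (by simp [hx]), if_neg (by simp)]
      exact pv_lastIdx_congr ((a :: as) ++ [x]) (a :: as) o as.length
        (fun i hi => List.getElem?_append_left (by simp; omega))

theorem pv_rfind_append_self (l : List Char) (o : Char) :
    PySem.Chars.rfind (l ++ [o]) [o] = (l.length : Int) := by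
  unfold PySem.Chars.rfind
  rw [pv_go_eq]
  have h1 : (l ++ [o])[l.length + 1]? = none := List.getElem?_eq_none (by simp)
  have h2 : (l ++ [o])[l.length]? = some o := by
    rw [List.getElem?_append_right (le_refl _)]; simp
  have hlen : (l ++ [o]).length = l.length + 1 := by simp
  rw [hlen]
  rw [show pvLastIdx (l ++ [o]) o (l.length + 1) = pvLastIdx (l ++ [o]) o l.length by
    simp [pvLastIdx]]
  exact pv_lastIdx_getElem _ _ _ h2

theorem pv_lastIdx_mem (s : List Char) (o : Char) :
    ∀ j, (∃ i, i ≤ j ∧ s[i]? = some o) →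
      ∃ r : Nat, pvLastIdx s o j = (r : Int) ∧ r ≤ j ∧ s[r]? = some o := by
  intro j
  induction j with
  | zero =>
      rintro ⟨i, hi, ho⟩
      interval_cases i
      exact ⟨0, by simp [pvLastIdx, ho], le_refl 0, ho⟩
  | succ j ih =>
      rintro ⟨i, hi, ho⟩
      by_cases h : s[j+1]? = some o
      · exact ⟨j+1, by simp [pvLastIdx, h], le_refl _, h⟩
      · have hij : i ≤ j := by
          rcases Nat.lt_or_ge i (j+1) with h' | h'
          · omega
          · exfalso; exact h (by rwa [Nat.le_antisymm hi h'] at ho)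
        obtain ⟨r, hr, hrj, hro⟩ := ih ⟨i, hij, ho⟩
        exact ⟨r, by simp [pvLastIdx, h, hr], Nat.le_succ_of_le hrj, hro⟩

theorem pv_rfind_mem (l : List Char) (o : Char) (h : o ∈ l) :
    ∃ r : Nat, PySem.Chars.rfind l [o] = (r : Int) ∧ r < l.length := by
  obtain ⟨i, hi⟩ := List.getElem?_of_mem h
  have hilen : i < l.length := (List.getElem?_eq_some_iff.mp hi).1
  obtain ⟨r, hr, _, hro⟩ := pv_lastIdx_mem l o l.length ⟨i, le_of_lt hilen, hi⟩
  refine ⟨r, ?_, (List.getElem?_eq_some_iff.mp hro).1⟩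
  unfold PySem.Chars.rfind
  rw [pv_go_eq, hr]

-- appending a non-opener x: the condition stays, except x = c kills it
theorem pv_cond_append (o c x : Char) (hx : x ≠ o) (l : List Char) :
    pvCond o c (l ++ [x]) = (pvCond o c l && !(x == c)) := by
  by_cases hm : o ∈ l
  · obtain ⟨r, hr, hrlt⟩ := pv_rfind_mem l o hm
    have hm2 : o ∈ l ++ [x] := List.mem_append_left _ hm
    unfold pvCond
    rw [pv_rfind_append l o x hx, hr]
    rw [PySem.Chars.slice_eq_listSlice, PySem.Chars.slice_eq_listSlice,
      PySem.List.slice_from _ (by positivity), PySem.List.slice_from _ (by positivity)]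
    simp only [Int.toNat_natCast]
    rw [List.drop_append_of_le_length (le_of_lt hrlt)]
    simp [pv_isIn_singleton, hm, hm2]
    by_cases hc : c ∈ List.drop r l
    · simp [hc]
    · by_cases hxc : x = c
      · simp [hc, hxc]
      · simp [hc, hxc, Ne.symm hxc]
  · have hm2 : o ∉ l ++ [x] := by simp [hm, Ne.symm hx]
    unfold pvCond
    simp [pv_isIn_singleton, hm, hm2]

-- appending the opener itself: the condition becomes true (its closer differs from it)
theorem pv_cond_append_self (o c : Char) (hco : c ≠ o) (l : List Char) :
    pvCond o c (l ++ [o]) = true := by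
  unfold pvCond
  rw [pv_rfind_append_self]
  rw [PySem.Chars.slice_eq_listSlice, PySem.List.slice_from _ (by positivity)]
  simp only [Int.toNat_natCast, List.drop_left]
  simp [pv_isIn_singleton, hco]

-- the loop step on a line with no candidate does nothing
theorem pv_step_nil (l : List Char) (h : pvCands l = []) : pvStepA l = l := by
  unfold pvCands at h
  unfold pvStepA
  by_cases h1 : pvCond '(' ')' l <;> by_cases h2 : pvCond '[' ']' l <;>
    by_cases h3 : pvCond '{' '}' l <;> simp [h1, h2, h3] at h ⊢

-- the loop step appends exactly the first candidate, and the rest stay candidates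
theorem pv_step_main (l : List Char) (h : Char) (t : List Char) (hc : pvCands l = h :: t) :
    pvStepA l = l ++ [h] ∧ pvCands (l ++ [h]) = t := by
  unfold pvCands at hc ⊢
  unfold pvStepA
  by_cases h1 : pvCond '(' ')' l <;> by_cases h2 : pvCond '[' ']' l <;>
    by_cases h3 : pvCond '{' '}' l <;>
    simp [h1, h2, h3] at hc <;>
    obtain ⟨hh, ht⟩ := hc <;> subst hh <;> subst ht <;>
    simp [h1, h2, h3,
      pv_cond_append '(' ')' ')' (by decide), pv_cond_append '[' ']' ')' (by decide),
      pv_cond_append '{' '}' ')' (by decide), pv_cond_append '(' ')' ']' (by decide),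
      pv_cond_append '[' ']' ']' (by decide), pv_cond_append '{' '}' ']' (by decide),
      pv_cond_append '(' ')' '}' (by decide), pv_cond_append '[' ']' '}' (by decide),
      pv_cond_append '{' '}' '}' (by decide)]

-- iterating the loop step m times appends the first m candidates
theorem pv_iter_eq (m : Nat) : ∀ l : List Char, pvStepA^[m] l = l ++ (pvCands l).take m := by
  induction m with
  | zero => intro l; simp
  | succ m ih =>
      intro l
      rw [Function.iterate_succ_apply]
      cases hc : pvCands l with
      | nil => rw [pv_step_nil l hc, ih l, hc]; simp
      | cons h t =>
          obtain ⟨hs, hc2⟩ := pv_step_main l h t hc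
          rw [hs, ih (l ++ [h]), hc2, List.take_succ_cons, List.append_assoc]
          simp

-- a foldl that ignores the element is iteration
theorem pv_foldl_iter {α β : Type} (f : β → β) : ∀ (xs : List α) (s : β),
    xs.foldl (fun s _ => f s) s = f^[xs.length] s := by
  intro xs
  induction xs with
  | nil => intro s; simp
  | cons x xs ih => intro s; simp [List.foldl_cons, ih, Function.iterate_succ_apply]

-- Python's str.count of a single character is List.count
theorem pv_count_go_singleton (y : Char) :
    ∀ (l : List Char) (fuel acc : Nat), l.length ≤ fuel →
      PySem.Chars.count.go [y] fuel l acc = acc + l.count y := by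
  intro l
  induction l with
  | nil => intro fuel acc _; cases fuel <;> simp [PySem.Chars.count.go]
  | cons a t ih =>
      intro fuel acc hf
      cases fuel with
      | zero => simp at hf
      | succ f =>
          have hf' : t.length ≤ f := by simpa using hf
          by_cases hay : a = y
          · subst hay
            simp only [PySem.Chars.count.go, pv_isPrefixOf_singleton]
            simp [ih f (acc+1) hf']
            omega
          · simp only [PySem.Chars.count.go, pv_isPrefixOf_singleton]
            simp [hay, ih f acc hf']

theorem pv_count_singleton (l : List Char) (y : Char) :
    PySem.Chars.count l [y] = l.count y := by
  unfold PySem.Chars.count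
  simp [pv_count_go_singleton y l l.length 0 (le_refl _)]

-- what B's scan computes: the signed depth and A's three conditions
def pvScanVal (l : List Char) : Int × Bool × Bool × Bool :=
  (((l.count '(' : Int) + (l.count '[' : Int) + (l.count '{' : Int))
     - ((l.count ')' : Int) + (l.count ']' : Int) + (l.count '}' : Int)),
   pvCond '(' ')' l, pvCond '[' ']' l, pvCond '{' '}' l)

theorem pv_scan_eq (l : List Char) :
    l.foldl pvScanStep (0, false, false, false) = pvScanVal l := by
  induction l using List.reverseRecOn with
  | nil =>
      simp [pvScanVal]
      unfold pvCond
      simp [pv_isIn_singleton]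
  | append_singleton l x ih =>
      rw [List.foldl_append, List.foldl_cons, List.foldl_nil, ih]
      unfold pvScanVal pvScanStep
      by_cases h1 : x = '('
      · subst h1
        simp [List.count_append, pv_cond_append_self '(' ')' (by decide),
          pv_cond_append '[' ']' '(' (by decide), pv_cond_append '{' '}' '(' (by decide)]
        push_cast; ring
      · by_cases h2 : x = '['
        · subst h2
          simp [List.count_append, pv_cond_append_self '[' ']' (by decide),
            pv_cond_append '(' ')' '[' (by decide), pv_cond_append '{' '}' '[' (by decide)]
          push_cast; ring
        · by_cases h3 : x = '{'
          · subst h3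
            simp [List.count_append, pv_cond_append_self '{' '}' (by decide),
              pv_cond_append '(' ')' '{' (by decide), pv_cond_append '[' ']' '{' (by decide)]
            push_cast; ring
          · by_cases h4 : x = ')'
            · subst h4
              simp [List.count_append, pv_cond_append '(' ')' ')' (by decide),
                pv_cond_append '[' ']' ')' (by decide), pv_cond_append '{' '}' ')' (by decide)]
              push_cast; ring
            · by_cases h5 : x = ']'
              · subst h5
                simp [List.count_append, pv_cond_append '(' ')' ']' (by decide),
                  pv_cond_append '[' ']' ']' (by decide), pv_cond_append '{' '}' ']' (by decide)]
                push_cast; ring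
              · by_cases h6 : x = '}'
                · subst h6
                  simp [List.count_append, pv_cond_append '(' ')' '}' (by decide),
                    pv_cond_append '[' ']' '}' (by decide), pv_cond_append '{' '}' '}' (by decide)]
                  push_cast; ring
                · simp [List.count_append, h1, h2, h3, h4, h5, h6,
                    pv_cond_append '(' ')' x h1, pv_cond_append '[' ']' x h2,
                    pv_cond_append '{' '}' x h3]

theorem pv_line_eq (l : List Char) : pvFixLineA l = pvFixLineB l := by
  unfold pvFixLineA pvFixLineB
  rw [pv_scan_eq]
  simp only [pvScanVal, pv_count_singleton]
  by_cases h : ((List.count '(' l : Int) + (List.count '[' l : Int) + (List.count '{' l : Int))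
      > ((List.count ')' l : Int) + (List.count ']' l : Int) + (List.count '}' l : Int))
  · rw [if_pos h, if_pos (by omega :
      ((List.count '(' l : Int) + (List.count '[' l : Int) + (List.count '{' l : Int))
        - ((List.count ')' l : Int) + (List.count ']' l : Int) + (List.count '}' l : Int)) > 0)]
    rw [pv_foldl_iter, pv_iter_eq]
    unfold pvCands
    congr 2
    simp [PySem.List.length_pyRange_one]
  · rw [if_neg h, if_neg (by omega :
      ¬ (((List.count '(' l : Int) + (List.count '[' l : Int) + (List.count '{' l : Int))
        - ((List.count ')' l : Int) + (List.count ']' l : Int) + (List.count '}' l : Int)) > 0))]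

-- ===== VERDICT (by name: the statement is the Claim_ definition above) =====
theorem fix_unmatched_parentheses_spec : Claim_equal_fix_unmatched_parentheses := by
  intro content _
  unfold Spec_fix_unmatched_parentheses fix_unmatched_parentheses fix_unmatched_parentheses_alt
  rw [List.map_congr_left (fun l _ => pv_line_eq l)]
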